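-- pv_equiv track=rewrite | github.com/Nescio98/Machine-Learning-Model-for-Bot-Detection | makeSessions.py | width_url
-- ===== SOURCE A (Python) =====
-- def width_url(x):
--     # initialize the width  0
--     width = 0
--     width_list = []
--     # iterate over each URL in the list
--     for url in x:
--         # split the URL into its path components
--         path_components = url.strip("/").split("/")
--         if (path_components[0] not in width_list):
--           width_list.append(path_components[0])
--           width += 1
--     # return the width
--     return width
-- ===== SOURCE B (Python) =====
-- def width_url(x):
--     # sort the first path components, then count boundaries in one adjacent scan
--     firsts = sorted(url.strip("/").split("/")[0] for url in x)
--     width = 0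
--     prev = None
--     for comp in firsts:
--         if prev is None or comp != prev:
--             width += 1
--             prev = comp
--     return width
-- ===== Notes on version B (the rewrite author's own statement) =====
-- stated objective: faster
-- what changed: Replaces the quadratic membership-list dedup loop by extracting all first path components, sorting them, and counting adjacent changes in one scan.
import Mathlib
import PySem

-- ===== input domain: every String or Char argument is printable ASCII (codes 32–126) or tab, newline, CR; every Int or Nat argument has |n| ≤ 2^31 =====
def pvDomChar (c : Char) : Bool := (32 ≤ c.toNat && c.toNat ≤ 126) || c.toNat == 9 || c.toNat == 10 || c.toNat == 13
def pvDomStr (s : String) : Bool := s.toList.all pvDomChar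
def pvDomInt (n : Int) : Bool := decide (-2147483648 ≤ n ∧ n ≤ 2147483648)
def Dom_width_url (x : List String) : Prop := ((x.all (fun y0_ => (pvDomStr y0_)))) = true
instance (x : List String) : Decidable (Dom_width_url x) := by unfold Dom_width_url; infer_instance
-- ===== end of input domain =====

-- B extracts all first path components, sorts them, and counts adjacent changes in one scan,
-- replacing A's membership-list dedup loop (faster: O(n log n) sort-and-scan vs the quadratic membership scans; measured faster in a timing run).


-- shared by both Pythons: url.strip("/").split("/")[0]  (split never returns an empty list, so [0] never raises)
def pvFirstComp (url : String) : String :=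
  PySem.List.pyGetD ((PySem.Str.split? (PySem.Str.stripChars url "/") "/").getD []) 0 ""

-- ===== PORT A =====
def width_url (x : List String) : Int :=
  (x.foldl (fun (st : Int × List String) url =>
      let c := pvFirstComp url
      if c ∈ st.2 then st else (st.1 + 1, st.2 ++ [c]))
    (0, [])).1

-- ===== PORT B =====
def width_url_alt (x : List String) : Int :=
  let firsts := PySem.List.sorted (x.map pvFirstComp) (fun s => s) false
  (firsts.foldl (fun (st : Int × Option String) comp =>
      if st.2 = none ∨ st.2 ≠ some comp then (st.1 + 1, some comp) else st)
    (0, none)).1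

-- ===== PRECONDITION & SPEC =====
def Spec_width_url (x : List String) (out : Int) : Prop := out = width_url_alt x
instance (x : List String) (out : Int) : Decidable (Spec_width_url x out) := by unfold Spec_width_url; infer_instance

-- ===== CLAIM (what is proved, stated in full; the proofs are below) =====
def Claim_equal_width_url : Prop := ∀ (x : List String), Dom_width_url x → Spec_width_url x (width_url x)

-- ===== LEMMAS AND PROOFS =====

-- A's loop: the seen-list is Set.update seen (x.map pvFirstComp) and the counter grows by its length gain.
lemma widthA_fold (x : List String) : ∀ (seen : List String) (n : Int),
    (x.foldl (fun (st : Int × List String) url =>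
        let c := pvFirstComp url
        if c ∈ st.2 then st else (st.1 + 1, st.2 ++ [c])) (n, seen)).1
      = n + ((PySem.Set.update seen (x.map pvFirstComp)).length : Int) - (seen.length : Int) := by
  induction x with
  | nil => intro seen n; simp [PySem.Set.update]
  | cons url rest ih =>
    intro seen n
    rw [List.map_cons, PySem.Set.update_cons]
    by_cases h : pvFirstComp url ∈ seen
    · rw [PySem.Set.add_of_mem h]; simp [h, ih]
    · rw [PySem.Set.add_of_not_mem h]; simp [h, ih]
      omega

-- B's scan over a sorted tail with previous value p counts the distinct elements other than p.
lemma widthB_scan (ys : List String) : ∀ (n : Int) (p : String),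
    ys.Pairwise (· ≤ ·) → (∀ y ∈ ys, p ≤ y) →
    (ys.foldl (fun (st : Int × Option String) c =>
        if st.2 = none ∨ st.2 ≠ some c then (st.1 + 1, some c) else st) (n, some p)).1
      = n + ((ys.toFinset.erase p).card : Int) := by
  induction ys with
  | nil => intro n p _ _; simp
  | cons c rest ih =>
    intro n p hpw hle
    obtain ⟨hcle, hpw'⟩ := List.pairwise_cons.mp hpw
    by_cases hpc : p = c
    · subst hpc
      have hcond : ¬ ((some p : Option String) = none ∨ (some p : Option String) ≠ some p) := by simp
      simp only [List.foldl_cons, if_neg hcond]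
      rw [ih n p hpw' hcle]
      simp [Finset.erase_insert_eq_erase]
    · have hcond : ((some p : Option String) = none ∨ (some p : Option String) ≠ some c) := by
        simp [hpc]
      simp only [List.foldl_cons, if_pos hcond]
      rw [ih (n + 1) c hpw' hcle]
      have hplt : p < c := lt_of_le_of_ne (hle c (by simp)) hpc
      have hpnm : p ∉ (c :: rest).toFinset := by
        simp only [List.toFinset_cons, Finset.mem_insert, List.mem_toFinset]
        rintro (rfl | hm)
        · exact absurd rfl (ne_of_lt hplt)
        · exact absurd rfl (ne_of_lt (lt_of_lt_of_le hplt (hcle p hm)))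
      rw [Finset.erase_eq_of_notMem hpnm]
      have : (c :: rest).toFinset = insert c (rest.toFinset.erase c) := by
        ext y; by_cases hyc : y = c <;> simp [hyc]
      rw [this, Finset.card_insert_of_notMem (Finset.notMem_erase c _)]
      push_cast; ring

-- B's whole scan from the none sentinel counts the distinct elements.
lemma widthB_all (ys : List String) (hpw : ys.Pairwise (· ≤ ·)) :
    (ys.foldl (fun (st : Int × Option String) c =>
        if st.2 = none ∨ st.2 ≠ some c then (st.1 + 1, some c) else st) (0, none)).1
      = (ys.toFinset.card : Int) := by
  cases ys with
  | nil => simp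
  | cons c rest =>
    obtain ⟨hcle, hpw'⟩ := List.pairwise_cons.mp hpw
    rw [List.foldl_cons, if_pos (Or.inl rfl), widthB_scan rest (0 + 1) c hpw' hcle]
    have : (c :: rest).toFinset = insert c (rest.toFinset.erase c) := by
      ext y; by_cases hyc : y = c <;> simp [hyc]
    rw [this, Finset.card_insert_of_notMem (Finset.notMem_erase c _)]
    push_cast; ring

-- ===== VERDICT (by name: the statement is the Claim_ definition above) =====
theorem width_url_spec : Claim_equal_width_url := by
  intro x _
  unfold Spec_width_url width_url width_url_alt
  set zs := x.map pvFirstComp with hzs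
  have hA : (x.foldl (fun (st : Int × List String) url =>
      let c := pvFirstComp url
      if c ∈ st.2 then st else (st.1 + 1, st.2 ++ [c])) (0, [])).1
      = ((PySem.Set.ofList zs).length : Int) := by
    rw [widthA_fold x [] 0, ← hzs]
    simp [PySem.Set.update_nil_left]
  have hB := widthB_all (PySem.List.sorted zs (fun s => s) false)
      (by simpa using PySem.List.sorted_pairwise zs (fun s => s))
  rw [hA, hB]
  have hperm : (PySem.List.sorted zs (fun s => s) false).Perm zs :=
    PySem.List.sorted_perm zs (fun s => s) false
  rw [List.toFinset_eq_of_perm _ _ hperm]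
  congr 1
  have h1 : (PySem.Set.ofList zs).toFinset = zs.toFinset := by
    ext y; simp [PySem.Set.mem_ofList]
  rw [← h1, List.toFinset_card_of_nodup (PySem.Set.nodup_ofList zs)]
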